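-- pv_equiv track=rewrite | github.com/ictxiangxin/boson | bs_helper.py | bs_terminal_set
-- ===== SOURCE A (Python) =====
-- import copy
--
-- def bs_non_terminal_set(sentence_set):
--     return set([sentense[0] for sentense in sentence_set])
--
-- def bs_terminal_set(sentence_set, non_terminal_set=None):
--     if non_terminal_set is None:
--         non_terminal_set = bs_non_terminal_set(sentence_set)
--     else:
--         non_terminal_set = copy.deepcopy(non_terminal_set)
--     all_elem = set()
--     for sentense in sentence_set:
--         all_elem |= set([elem for elem in sentense])
--     return all_elem - non_terminal_set
-- ===== SOURCE B (Python) =====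
-- def bs_terminal_set(sentence_set, non_terminal_set=None):
--     # Classification-table approach: one dict maps every symbol to a flag
--     # "is this a non-terminal?", then the terminals are read off the table.
--     status = {}  # symbol -> True iff the symbol is a non-terminal
--     if non_terminal_set is None:
--         for sentence in sentence_set:
--             for position, elem in enumerate(sentence):
--                 status[elem] = status.get(elem, False) or position == 0
--     else:
--         for symbol in non_terminal_set:
--             status[symbol] = True
--         for sentence in sentence_set:
--             for elem in sentence:
--                 status.setdefault(elem, False)
--     return {symbol for symbol, is_non_terminal in status.items() if not is_non_terminal}
-- ===== Notes on version B (the rewrite author's own statement) =====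
-- stated objective: alternative
-- what changed: Instead of materialising two sets (the union of all symbols and the non-terminal set) and taking their difference, B builds a single classification dict mapping every symbol to an is-non-terminal flag (marked in place while scanning, using the position inside the sentence in the None case) and then reads the terminals off that table.
import Mathlib
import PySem

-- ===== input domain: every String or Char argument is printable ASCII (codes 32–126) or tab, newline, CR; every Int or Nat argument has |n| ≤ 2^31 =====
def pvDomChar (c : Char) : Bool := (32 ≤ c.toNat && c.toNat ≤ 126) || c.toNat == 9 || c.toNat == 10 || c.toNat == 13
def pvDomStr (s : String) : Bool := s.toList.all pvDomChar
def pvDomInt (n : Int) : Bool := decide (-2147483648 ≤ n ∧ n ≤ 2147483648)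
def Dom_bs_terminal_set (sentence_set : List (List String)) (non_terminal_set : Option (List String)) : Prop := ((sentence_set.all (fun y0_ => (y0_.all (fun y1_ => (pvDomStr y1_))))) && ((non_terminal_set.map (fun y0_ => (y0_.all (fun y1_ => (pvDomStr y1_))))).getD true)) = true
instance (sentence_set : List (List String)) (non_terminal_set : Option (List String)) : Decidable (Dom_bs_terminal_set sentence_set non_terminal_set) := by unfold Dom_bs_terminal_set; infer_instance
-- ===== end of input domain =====

-- B replaces union-then-subtract by a classification table: one dict mapping every symbol to an
-- is-non-terminal flag, from which the terminals are read off; same values (alternative decomposition).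
-- ===== PORT A =====
-- sentense[0] ported as pyGetD _ 0 "" (exact under Pre_, which demands nonempty sentences in the None case)
def bs_non_terminal_set (sentence_set : List (List String)) : PySem.Set String :=
  PySem.Set.ofList (sentence_set.map (fun sentense => PySem.List.pyGetD sentense 0 ""))

def bs_terminal_set (sentence_set : List (List String)) (non_terminal_set : Option (List String)) : List String :=
  let nts : PySem.Set String :=
    match non_terminal_set with
    | none => bs_non_terminal_set sentence_set
    | some l => l        -- copy.deepcopy: same value
  let all_elem : PySem.Set String :=
    sentence_set.foldl (fun acc sentense => PySem.Set.union acc (PySem.Set.ofList sentense)) PySem.Set.empty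
  PySem.Set.diff all_elem nts

-- ===== PORT B =====
def bs_terminal_set_alt (sentence_set : List (List String)) (non_terminal_set : Option (List String)) : List String :=
  let status : PySem.Dict String Bool :=      -- symbol -> True iff the symbol is a non-terminal
    match non_terminal_set with
    | none =>
        sentence_set.foldl
          (fun d sentence =>
            (PySem.List.enumerate sentence).foldl
              (fun d p => d.insert p.2 (d.getD p.2 false || (p.1 == 0))) d)
          PySem.Dict.empty
    | some l =>
        let d0 := l.foldl (fun d symbol => d.insert symbol true) PySem.Dict.empty
        sentence_set.foldl
          (fun d sentence => sentence.foldl (fun d elem => d.setdefault elem false) d) d0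
  PySem.Set.ofList ((status.items.filter (fun p => !p.2)).map Prod.fst)

-- ===== PRECONDITION & SPEC =====
-- Pre_ excludes only inputs where A raises IndexError: non_terminal_set is None and some sentence is empty.
def Pre_bs_terminal_set (sentence_set : List (List String)) (non_terminal_set : Option (List String)) : Prop :=
  non_terminal_set.isSome ∨ ∀ s ∈ sentence_set, s ≠ []
instance (sentence_set : List (List String)) (non_terminal_set : Option (List String)) : Decidable (Pre_bs_terminal_set sentence_set non_terminal_set) := by unfold Pre_bs_terminal_set; infer_instance
def pvWitness_bs_terminal_set : List (List String) × Option (List String) := ([["A", "a", "b"], ["B", "a"]], none)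
def Spec_bs_terminal_set (sentence_set : List (List String)) (non_terminal_set : Option (List String)) (out : List String) : Prop := out = bs_terminal_set_alt sentence_set non_terminal_set
instance (sentence_set : List (List String)) (non_terminal_set : Option (List String)) (out : List String) : Decidable (Spec_bs_terminal_set sentence_set non_terminal_set out) := by unfold Spec_bs_terminal_set; infer_instance

-- ===== CLAIM (what is proved, stated in full; the proofs are below) =====
def Claim_equal_bs_terminal_set : Prop := ∀ (sentence_set : List (List String)) (non_terminal_set : Option (List String)), Dom_bs_terminal_set sentence_set non_terminal_set → Pre_bs_terminal_set sentence_set non_terminal_set → Spec_bs_terminal_set sentence_set non_terminal_set (bs_terminal_set sentence_set non_terminal_set)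

-- ===== LEMMAS AND PROOFS =====

-- A's union loop is a foldl add over the flattened input
lemma union_loop_flatten (ss : List (List String)) :
    ∀ acc : PySem.Set String,
      ss.foldl (fun acc s => PySem.Set.union acc (PySem.Set.ofList s)) acc =
        ss.flatten.foldl PySem.Set.add acc := by
  induction ss with
  | nil => intro acc; rfl
  | cons a ss ih =>
      intro acc
      simp only [List.foldl_cons, List.flatten_cons, List.foldl_append, ih]
      congr 1
      have h1 : PySem.Set.union acc (PySem.Set.ofList a) = PySem.Set.update acc (PySem.Set.ofList a) := rfl
      rw [h1, PySem.Set.update_eq_append_filter, PySem.Set.ofList_ofList,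
        ← PySem.Set.update_eq_append_filter]
      rfl

-- a nested loop over (h sentence) is one loop over the flatMap
lemma nested_loop_flatMap {σ β : Type} (g : σ → β → σ) (h : List String → List β) (ss : List (List String)) :
    ∀ d0 : σ, ss.foldl (fun d s => (h s).foldl g d) d0 = (ss.flatMap h).foldl g d0 := by
  induction ss with
  | nil => intro d0; rfl
  | cons a ss ih => intro d0; simp [List.foldl_append, ih]

-- the flag accumulated by B's None-branch loop: true iff some pair marks k
lemma getD_flag_fold (qs : List (Int × String)) :
    ∀ (d : PySem.Dict String Bool) (k : String),
      (qs.foldl (fun d p => d.insert p.2 (d.getD p.2 false || (p.1 == 0))) d).getD k false =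
        (d.getD k false || qs.any (fun p => p.2 == k && p.1 == 0)) := by
  induction qs with
  | nil => intro d k; simp
  | cons p qs ih =>
      intro d k
      simp only [List.foldl_cons, ih, List.any_cons, PySem.Dict.getD_insert]
      by_cases hk : k = p.2
      · simp [hk, Bool.or_assoc]
      · have hb : (p.2 == k) = false := by simp [Ne.symm hk]
        simp [hk, hb]

-- the second components of an enumeration are the list itself
lemma enum_map_snd (s : List String) : ∀ i : Int, (PySem.List.enumerate s i).map Prod.snd = s := by
  induction s with
  | nil => intro i; rfl
  | cons a t ih => intro i; simp [PySem.List.enumerate, ih]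

-- no pair of an enumeration starting above 0 has index 0
lemma enum_no_zero (k : String) (s : List String) :
    ∀ i : Int, 0 < i → (PySem.List.enumerate s i).any (fun p => p.2 == k && p.1 == 0) = false := by
  induction s with
  | nil => intro i _; rfl
  | cons a t ih =>
      intro i hi
      simp only [PySem.List.enumerate, List.any_cons, ih (i + 1) (by omega), Bool.or_false]
      have : (i == (0 : Int)) = false := by simp; omega
      simp [this]

-- a nonempty sentence marks exactly its first element
lemma enum_flag_head (k : String) (s : List String) (hs : s ≠ []) :
    (PySem.List.enumerate s 0).any (fun p => p.2 == k && p.1 == 0) =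
      (PySem.List.pyGetD s 0 "" == k) := by
  cases s with
  | nil => exact absurd rfl hs
  | cons a t =>
      simp [PySem.List.enumerate, enum_no_zero k t 1 (by omega), PySem.List.pyGetD,
        PySem.List.pyGet?, PySem.List.pyIdx?]

-- reading a flag dict with Nodup keys: the kept keys
lemma items_filter_map_fst (d : PySem.Dict String Bool) (h : d.keys.Nodup) :
    (d.items.filter (fun p => !p.2)).map Prod.fst =
      d.keys.filter (fun k => !(d.getD k false)) := by
  rw [PySem.Dict.items_eq_map_keys d h false, List.filter_map, List.map_map]
  simp [Function.comp_def]

-- B's some-branch initialisation: flag true exactly on the given non-terminals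
lemma getD_insert_true_fold (l : List String) :
    ∀ (d : PySem.Dict String Bool) (k : String),
      (l.foldl (fun d s => d.insert s true) d).getD k false = (d.getD k false || l.contains k) := by
  induction l with
  | nil => intro d k; simp
  | cons a l ih =>
      intro d k
      simp only [List.foldl_cons, ih, List.contains_cons, PySem.Dict.getD_insert]
      by_cases hk : k = a
      · simp [hk]
      · have hb : (k == a) = false := by simp [hk]
        simp [hk, hb]

-- the setdefault loop never changes a flag read with default false
lemma getD_setdefault_fold (xs : List String) :
    ∀ (d : PySem.Dict String Bool) (k : String),
      (xs.foldl (fun d e => d.setdefault e false) d).getD k false = d.getD k false := by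
  induction xs with
  | nil => intro d k; rfl
  | cons e xs ih =>
      intro d k
      simp only [List.foldl_cons, ih]
      by_cases hc : d.contains e = true
      · rw [PySem.Dict.setdefault_of_contains _ _ hc]
      · rw [PySem.Dict.setdefault_of_not_contains _ _ (by simpa using hc),
          PySem.Dict.getD_insert]
        by_cases hk : k = e
        · subst hk; rw [if_pos rfl, PySem.Dict.getD_of_not_contains _ _ (by simpa using hc)]
        · rw [if_neg hk]

-- the setdefault loop appends the fresh keys: keys become a set-update
lemma keys_setdefault_fold (xs : List String) :
    ∀ d : PySem.Dict String Bool,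
      (xs.foldl (fun d e => d.setdefault e false) d).keys = PySem.Set.update d.keys xs := by
  induction xs with
  | nil => intro d; rfl
  | cons e xs ih =>
      intro d
      simp only [List.foldl_cons, PySem.Set.update_cons, ih]
      congr 1
      by_cases hc : d.contains e = true
      · rw [PySem.Dict.setdefault_of_contains _ _ hc,
          PySem.Set.add_of_mem (by rwa [← PySem.Dict.contains_iff_mem_keys])]
      · rw [PySem.Dict.setdefault_of_not_contains _ _ (by simpa using hc),
          PySem.Dict.keys_insert_of_not_contains _ _ (by simpa using hc),
          PySem.Set.add_of_not_mem (by rw [← PySem.Dict.contains_iff_mem_keys]; simpa using hc)]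

-- Set.contains of an ofList is plain list containment
lemma contains_ofList (l : List String) (k : String) :
    (PySem.Set.ofList l).contains k = l.contains k := by
  simp [PySem.Set.contains_eq_listContains, PySem.Set.mem_ofList]

-- a filter is idempotent
lemma filter_idem (p : String → Bool) (xs : List String) :
    (xs.filter p).filter p = xs.filter p :=
  List.filter_eq_self.mpr (fun _ ha => (List.mem_filter.mp ha).2)

-- ===== VERDICT (by name: the statement is the Claim_ definition above) =====
theorem bs_terminal_set_spec : Claim_equal_bs_terminal_set := by
  intro ss nts _ hpre
  unfold Spec_bs_terminal_set bs_terminal_set bs_terminal_set_alt bs_non_terminal_set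
  cases nts with
  | none =>
      have hne : ∀ s ∈ ss, s ≠ [] := by
        rcases hpre with h | h
        · exact absurd h (by simp)
        · exact h
      show PySem.Set.diff
          (ss.foldl (fun acc sentense => PySem.Set.union acc (PySem.Set.ofList sentense)) PySem.Set.empty)
          (PySem.Set.ofList (ss.map (fun sentense => PySem.List.pyGetD sentense 0 ""))) =
        PySem.Set.ofList
          (((ss.foldl (fun d sentence => (PySem.List.enumerate sentence 0).foldl
              (fun d p => d.insert p.2 (d.getD p.2 false || (p.1 == 0))) d) PySem.Dict.empty).items.filter
            (fun p => !p.2)).map Prod.fst)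
      rw [union_loop_flatten,
        show List.foldl PySem.Set.add PySem.Set.empty ss.flatten = PySem.Set.ofList ss.flatten from rfl,
        nested_loop_flatMap (fun d p => d.insert p.2 (d.getD p.2 false || (p.1 == 0)))
          (fun s => PySem.List.enumerate s 0) ss PySem.Dict.empty]
      have hnodup := PySem.Dict.nodup_keys_foldl_insert_key
        (ss.flatMap (fun s => PySem.List.enumerate s 0)) Prod.snd
        (fun d p => d.getD p.2 false || (p.1 == 0)) PySem.Dict.empty (by simp)
      have hkeys :
          ((ss.flatMap (fun s => PySem.List.enumerate s 0)).foldl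
            (fun d p => d.insert p.2 (d.getD p.2 false || (p.1 == 0))) PySem.Dict.empty).keys =
          PySem.Set.ofList ss.flatten := by
        rw [PySem.Dict.keys_foldl_insert_key (ss.flatMap (fun s => PySem.List.enumerate s 0)) Prod.snd
          (fun d p => d.getD p.2 false || (p.1 == 0)) PySem.Dict.empty]
        have hmap : (ss.flatMap (fun s => PySem.List.enumerate s 0)).map Prod.snd = ss.flatten := by
          rw [List.map_flatMap]
          simp only [enum_map_snd]
          exact List.flatMap_id'
        rw [hmap]
        rfl
      rw [items_filter_map_fst _ hnodup, hkeys]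
      beta_reduce
      rw [PySem.Set.ofList_eq_self_of_nodup _ ((PySem.Set.nodup_ofList ss.flatten).filter _)]
      simp only [PySem.Set.diff]
      apply List.filter_congr
      intro k hk
      rw [getD_flag_fold]
      have hany : (ss.flatMap (fun s => PySem.List.enumerate s 0)).any
          (fun p => p.2 == k && p.1 == 0) =
          (ss.map (fun sentense => PySem.List.pyGetD sentense 0 "")).contains k := by
        rw [List.any_flatMap,
          PySem.List.any_congr_mem (fun s hs => enum_flag_head k s (hne s hs))]
        rw [Bool.eq_iff_iff]
        simp only [List.any_eq_true, List.contains_iff_mem, List.mem_map, beq_iff_eq]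
      rw [hany]
      simp [PySem.Set.contains_eq_listContains]
  | some l =>
      show PySem.Set.diff
          (ss.foldl (fun acc sentense => PySem.Set.union acc (PySem.Set.ofList sentense)) PySem.Set.empty) l =
        PySem.Set.ofList
          (((ss.foldl (fun d sentence => sentence.foldl (fun d elem => d.setdefault elem false) d)
              (l.foldl (fun d symbol => d.insert symbol true) PySem.Dict.empty)).items.filter
            (fun p => !p.2)).map Prod.fst)
      rw [union_loop_flatten,
        show List.foldl PySem.Set.add PySem.Set.empty ss.flatten = PySem.Set.ofList ss.flatten from rfl,
        nested_loop_flatMap (fun d e => d.setdefault e false) (fun s => s) ss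
          (l.foldl (fun d symbol => d.insert symbol true) PySem.Dict.empty),
        List.flatMap_id']
      have hkeys0 : (l.foldl (fun d symbol => d.insert symbol true) PySem.Dict.empty).keys
          = PySem.Set.ofList l := by
        rw [PySem.Dict.keys_foldl_insert l (fun _ _ => true) PySem.Dict.empty]
        rfl
      have hnodup : ((ss.flatten).foldl (fun d e => d.setdefault e false)
          (l.foldl (fun d symbol => d.insert symbol true) PySem.Dict.empty)).keys.Nodup := by
        rw [keys_setdefault_fold, hkeys0]
        exact PySem.Set.nodup_update _ _ (PySem.Set.nodup_ofList l)
      rw [items_filter_map_fst _ hnodup, keys_setdefault_fold, hkeys0]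
      have hfc : (PySem.Set.update (PySem.Set.ofList l) ss.flatten).filter
            (fun k => !((ss.flatten).foldl (fun d e => d.setdefault e false)
              (l.foldl (fun d symbol => d.insert symbol true) PySem.Dict.empty)).getD k false)
          = (PySem.Set.update (PySem.Set.ofList l) ss.flatten).filter (fun k => !l.contains k) := by
        apply List.filter_congr
        intro k hk
        rw [getD_setdefault_fold, getD_insert_true_fold]
        simp
      rw [hfc, PySem.Set.update_eq_append_filter, List.filter_append]
      have h1 : (PySem.Set.ofList l).filter (fun k => !l.contains k) = [] := by
        rw [List.filter_eq_nil_iff]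
        intro k hk
        have hmem : k ∈ l := (PySem.Set.mem_ofList _ _).1 hk
        simp [hmem]
      rw [h1, List.nil_append]
      have hin : (PySem.Set.ofList ss.flatten).filter (fun y => !(PySem.Set.ofList l).contains y)
          = (PySem.Set.ofList ss.flatten).filter (fun y => !l.contains y) := by
        apply List.filter_congr
        intro y hy
        rw [contains_ofList]
      rw [hin, filter_idem]
      rw [PySem.Set.ofList_eq_self_of_nodup _ ((PySem.Set.nodup_ofList ss.flatten).filter _)]
      simp only [PySem.Set.diff]
      apply List.filter_congr
      intro k hk
      rfl
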